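-- pv_equiv track=rewrite | github.com/DasTarrVn/Homework | ITer/Python/LA/52500029_52500044.py | longest_cons_odd_num_each_row
-- ===== SOURCE A (Python) =====
-- def longest_cons_odd_num_each_row(row):
--     max_len = 0
--     current_len = 0
--
--     for num in row:
--         if num % 2 != 0:
--             current_len = current_len + 1
--             if current_len > max_len:
--                 max_len = current_len
--         else:
--             current_len = 0
--
--     return max_len
-- ===== SOURCE B (Python) =====
-- def longest_cons_odd_num_each_row(row):
--     # Two-pointer run decomposition: the inner scan finds the end of each
--     # maximal run of odd numbers; answer is the max of the run lengths.
--     best = 0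
--     n = len(row)
--     i = 0
--     while i < n:
--         j = i
--         while j < n and row[j] % 2 != 0:
--             j += 1
--         if j > i:
--             best = max(best, j - i)
--             i = j
--         else:
--             i += 1
--     return best
-- ===== Notes on version B (the rewrite author's own statement) =====
-- stated objective: alternative
-- what changed: Replaced the per-element running-counter scan (current_len/max_len updated at every element) by a run-decomposition loop: an inner scan measures each maximal run of odd numbers at once, the list is advanced past the whole run, and the answer is the max of the run lengths.
import Mathlib
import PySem

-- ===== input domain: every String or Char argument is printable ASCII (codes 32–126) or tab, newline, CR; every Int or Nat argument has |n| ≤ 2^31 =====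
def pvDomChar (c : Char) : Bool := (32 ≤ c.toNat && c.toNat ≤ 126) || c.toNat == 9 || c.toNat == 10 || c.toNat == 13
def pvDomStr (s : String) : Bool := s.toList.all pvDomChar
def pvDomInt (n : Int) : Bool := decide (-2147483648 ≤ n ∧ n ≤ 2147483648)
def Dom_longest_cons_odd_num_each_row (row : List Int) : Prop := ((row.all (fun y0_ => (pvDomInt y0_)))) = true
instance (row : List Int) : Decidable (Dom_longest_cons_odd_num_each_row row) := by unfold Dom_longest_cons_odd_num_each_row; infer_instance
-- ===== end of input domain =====

-- B replaces A's per-element running counter by a two-pointer run decomposition (an inner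
-- scan finds the end of each maximal odd run; answer = max of run lengths); alternative
-- structure, same linear cost.


-- ===== PORT A =====
def longest_cons_odd_num_each_row (row : List Int) : Int :=
  (row.foldl
    (fun (s : Int × Int) num =>
      if PySem.Int.mod num 2 ≠ 0 then
        let current_len := s.2 + 1
        (if current_len > s.1 then current_len else s.1, current_len)
      else
        (s.1, 0))
    (0, 0)).1

-- ===== PORT B =====
-- inner while loop of B: 'while j < n and row[j] % 2 != 0: j += 1'; the loop indices are
-- nonnegative Python ints, ported as Nat; row[j] is in range by the guard j < n, ported
-- with getD (exact there)
def pvInner (row : List Int) (j : Nat) : Nat :=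
  if h : j < row.length ∧ PySem.Int.mod (row.getD j 0) 2 ≠ 0 then
    pvInner row (j + 1)
  else j
  termination_by row.length - j
  decreasing_by omega

-- outer while loop of B: 'while i < n' with body choosing j > i (consume the run) or i+1;
-- 'j - i' is a Nat subtraction with j > i, exact for Python's int subtraction there
def pvOuter (row : List Int) (i : Nat) (best : Int) : Int :=
  if hi : i < row.length then
    let j := pvInner row i
    if hj : j > i then
      pvOuter row j (max best ((j - i : Nat) : Int))
    else
      pvOuter row (i + 1) best
  else best
  termination_by row.length - i
  decreasing_by
    · omega
    · omega

def longest_cons_odd_num_each_row_alt (row : List Int) : Int :=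
  pvOuter row 0 0

-- ===== PRECONDITION & SPEC =====
def Spec_longest_cons_odd_num_each_row (row : List Int) (out : Int) : Prop := out = longest_cons_odd_num_each_row_alt row
instance (row : List Int) (out : Int) : Decidable (Spec_longest_cons_odd_num_each_row row out) := by unfold Spec_longest_cons_odd_num_each_row; infer_instance

-- ===== CLAIM (what is proved, stated in full; the proofs are below) =====
def Claim_equal_longest_cons_odd_num_each_row : Prop := ∀ (row : List Int), Dom_longest_cons_odd_num_each_row row → Spec_longest_cons_odd_num_each_row row (longest_cons_odd_num_each_row row)

-- ===== LEMMAS AND PROOFS =====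

-- length of the leading run of odd numbers
def pvRunLen : List Int → Nat
  | [] => 0
  | x :: xs => if PySem.Int.mod x 2 ≠ 0 then pvRunLen xs + 1 else 0

-- intermediate description of the answer: pvF row c = final max_len starting from
-- max_len = current_len = c (clipped at 0 when no odd element follows)
def pvF : List Int → Int → Int
  | [], _ => 0
  | x :: xs, c => if PySem.Int.mod x 2 ≠ 0 then max (c + 1) (pvF xs (c + 1)) else pvF xs 0

theorem pvA_fold (row : List Int) : ∀ m c : Int, 0 ≤ c → c ≤ m →
    (row.foldl
      (fun (s : Int × Int) num =>
        if PySem.Int.mod num 2 ≠ 0 then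
          let current_len := s.2 + 1
          (if current_len > s.1 then current_len else s.1, current_len)
        else
          (s.1, 0))
      (m, c)).1 = max m (pvF row c) := by
  induction row with
  | nil => intro m c h0 hcm; simp only [List.foldl_nil, pvF]; omega
  | cons x xs ih =>
    intro m c h0 hcm
    by_cases hx : PySem.Int.mod x 2 ≠ 0
    · simp only [List.foldl_cons, pvF]
      rw [if_pos hx, if_pos hx]
      have h1 : (if c + 1 > m then c + 1 else m) = max m (c + 1) := by omega
      rw [h1]
      rw [ih (max m (c + 1)) (c + 1) (by omega) (by omega)]
      omega
    · simp only [List.foldl_cons, pvF]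
      rw [if_neg hx, if_neg hx]
      rw [ih m 0 le_rfl (by omega)]

theorem pvRunLen_le (xs : List Int) : pvRunLen xs ≤ xs.length := by
  induction xs with
  | nil => simp [pvRunLen]
  | cons x xs ih =>
    simp only [pvRunLen, List.length_cons]
    split <;> omega

theorem pvF_indep (xs : List Int) (c : Int) (h : pvRunLen xs = 0) : pvF xs c = pvF xs 0 := by
  cases xs with
  | nil => simp [pvF]
  | cons y ys =>
    simp only [pvRunLen] at h
    by_cases hy : PySem.Int.mod y 2 ≠ 0
    · rw [if_pos hy] at h; omega
    · simp only [pvF]; rw [if_neg hy, if_neg hy]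

theorem pvF_run (row : List Int) : ∀ c : Int, 0 ≤ c → 0 < pvRunLen row →
    pvF row c = max (c + (pvRunLen row : Int)) (pvF (row.drop (pvRunLen row)) 0) := by
  induction row with
  | nil => intro c _ h; simp [pvRunLen] at h
  | cons x xs ih =>
    intro c h0 hk
    by_cases hx : PySem.Int.mod x 2 ≠ 0
    · simp only [pvRunLen] at hk ⊢
      rw [if_pos hx] at hk ⊢
      simp only [pvF, List.drop_succ_cons]
      rw [if_pos hx]
      by_cases hxs : pvRunLen xs = 0
      · simp only [hxs]
        rw [pvF_indep xs (c + 1) hxs]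
        simp only [List.drop_zero, Nat.cast_add, Nat.cast_zero, Nat.cast_one]
        omega
      · rw [ih (c + 1) (by omega) (by omega)]
        have : (1 : Int) ≤ (pvRunLen xs : Int) := by exact_mod_cast Nat.one_le_iff_ne_zero.mpr hxs
        omega
    · simp only [pvRunLen] at hk
      rw [if_neg hx] at hk
      omega

-- the inner scan computes start + length of the leading odd run of the suffix
theorem pvInner_eq (row : List Int) (j : Nat) (hj : j ≤ row.length) :
    pvInner row j = j + pvRunLen (row.drop j) := by
  fun_induction pvInner row j with
  | case1 j h ih =>
    have hlt : j < row.length := h.1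
    have hdrop : row.drop j = row[j] :: row.drop (j + 1) := List.drop_eq_getElem_cons hlt
    have hget : row.getD j 0 = row[j] := List.getD_eq_getElem row 0 hlt
    rw [ih (by omega), hdrop]
    simp only [pvRunLen]
    rw [if_pos (hget ▸ h.2)]
    omega
  | case2 j h =>
    rcases Nat.lt_or_ge j row.length with hlt | hge
    · have hdrop : row.drop j = row[j] :: row.drop (j + 1) := List.drop_eq_getElem_cons hlt
      have hget : row.getD j 0 = row[j] := List.getD_eq_getElem row 0 hlt
      have hx : ¬ PySem.Int.mod row[j] 2 ≠ 0 := fun hc => h ⟨hlt, hget ▸ hc⟩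
      rw [hdrop]
      simp only [pvRunLen]
      rw [if_neg hx]
      omega
    · have : j = row.length := by omega
      subst this
      simp [pvRunLen]

theorem pvOuter_char (row : List Int) : ∀ (i : Nat) (best : Int), i ≤ row.length → 0 ≤ best →
    pvOuter row i best = max best (pvF (row.drop i) 0) := by
  intro i
  induction hn : row.length - i using Nat.strong_induction_on generalizing i with
  | _ n ih =>
    intro best hi hb
    rw [pvOuter]
    by_cases hlt : i < row.length
    · rw [dif_pos hlt]
      have hje : pvInner row i = i + pvRunLen (row.drop i) := pvInner_eq row i (by omega)
      have hkle : pvRunLen (row.drop i) ≤ row.length - i := by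
        have := pvRunLen_le (row.drop i)
        simpa [List.length_drop] using this
      by_cases hk : 0 < pvRunLen (row.drop i)
      · rw [dif_pos (by omega)]
        rw [ih (row.length - pvInner row i) (by omega) (pvInner row i) rfl
              (max best ((pvInner row i - i : Nat) : Int)) (by omega) (by omega)]
        rw [pvF_run (row.drop i) 0 le_rfl hk]
        rw [hje, List.drop_drop]
        have harith : (↑(i + pvRunLen (row.drop i) - i) : Int) = (pvRunLen (row.drop i) : Int) := by
          omega
        rw [harith]
        omega
      · rw [dif_neg (by omega)]
        rw [ih (row.length - (i + 1)) (by omega) (i + 1) rfl best (by omega) hb]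
        have hdrop : row.drop i = row[i] :: row.drop (i + 1) := List.drop_eq_getElem_cons hlt
        have hx : ¬ PySem.Int.mod row[i] 2 ≠ 0 := by
          intro hc
          rw [hdrop] at hk
          simp only [pvRunLen] at hk
          rw [if_pos hc] at hk
          omega
        rw [hdrop]
        simp only [pvF]
        rw [if_neg hx]
    · rw [dif_neg hlt]
      have : i = row.length := by omega
      subst this
      simp only [List.drop_length, pvF]
      omega

-- ===== VERDICT (by name: the statement is the Claim_ definition above) =====
theorem longest_cons_odd_num_each_row_spec : Claim_equal_longest_cons_odd_num_each_row := by
  intro row _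
  show longest_cons_odd_num_each_row row = longest_cons_odd_num_each_row_alt row
  unfold longest_cons_odd_num_each_row longest_cons_odd_num_each_row_alt
  rw [pvA_fold row 0 0 le_rfl le_rfl, pvOuter_char row 0 0 (by omega) le_rfl]
  simp
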